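-- pv_equiv track=rewrite | github.com/pypi-data/pypi-mirror-401 | packages/provide-foundation/provide_foundation-0.3.0.post1.tar.gz/provide_foundation-0.3.0.post1/src/provide/foundation/crypto/utils.py | format_hash
-- ===== SOURCE A (Python) =====
-- def format_hash(
--     hash_value: str,
--     group_size: int = 8,
--     groups: int = 0,
--     separator: str = " ",
-- ) -> str:
--     """Format a hash value for display.
--
--     Args:
--         hash_value: Hash value to format
--         group_size: Number of characters per group
--         groups: Number of groups to show (0 for all)
--         separator: Separator between groups
--
--     Returns:
--         Formatted hash string
--
--     Examples:
--         >>> format_hash("abc123def456", group_size=4, separator="-")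
--         "abc1-23de-f456"
--         >>> format_hash("abc123def456", group_size=4, groups=2)
--         "abc1 23de"
--
--     """
--     if group_size <= 0:
--         return hash_value
--
--     formatted_parts = []
--     for i in range(0, len(hash_value), group_size):
--         formatted_parts.append(hash_value[i : i + group_size])
--         if groups > 0 and len(formatted_parts) >= groups:
--             break
--
--     return separator.join(formatted_parts)
-- ===== SOURCE B (Python) =====
-- def format_hash(
--     hash_value: str,
--     group_size: int = 8,
--     groups: int = 0,
--     separator: str = " ",
-- ) -> str:
--     if group_size <= 0:
--         return hash_value
--     remaining = groups if groups > 0 else -1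
--     parts = []
--     rest = hash_value
--     while rest and remaining != 0:
--         parts.append(rest[:group_size])
--         rest = rest[group_size:]
--         remaining -= 1
--     return separator.join(parts)
-- ===== Notes on version B (the rewrite author's own statement) =====
-- stated objective: alternative
-- what changed: Replaces A's index loop over range(0, len, group_size) with append-and-break by a loop that repeatedly peels the leading group_size characters off the string while counting down the remaining groups, stopping when the string is consumed or the countdown hits zero.
import Mathlib
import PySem

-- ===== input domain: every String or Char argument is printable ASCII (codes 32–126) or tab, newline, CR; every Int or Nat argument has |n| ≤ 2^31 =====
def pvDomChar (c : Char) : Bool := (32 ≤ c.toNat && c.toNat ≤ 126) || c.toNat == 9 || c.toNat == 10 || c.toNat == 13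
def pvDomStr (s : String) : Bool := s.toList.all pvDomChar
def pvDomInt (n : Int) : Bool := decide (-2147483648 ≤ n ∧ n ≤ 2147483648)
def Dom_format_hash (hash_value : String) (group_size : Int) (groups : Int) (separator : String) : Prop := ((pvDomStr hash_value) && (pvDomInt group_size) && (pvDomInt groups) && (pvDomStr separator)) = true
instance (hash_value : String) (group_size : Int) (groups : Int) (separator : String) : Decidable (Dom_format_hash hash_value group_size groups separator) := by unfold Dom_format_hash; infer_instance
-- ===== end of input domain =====

-- B replaces A's index loop (range stepping with an in-loop break) by repeatedly peeling the
-- leading group off the string with a countdown of remaining groups: a different decomposition.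


-- ===== PORT A =====
-- A's for-loop over range(0, len(hash_value), group_size) with the in-loop break,
-- transliterated as structural recursion over the range list with the parts accumulator.
def formatHashLoopA (hv : String) (gs grps : Int) : List Int → List String → List String
  | [], parts => parts
  | i :: rest, parts =>
    let parts' := parts ++ [PySem.Str.slice hv (some i) (some (i + gs))]
    if grps > 0 ∧ (parts'.length : Int) ≥ grps then parts'
    else formatHashLoopA hv gs grps rest parts'

def format_hash (hash_value : String) (group_size : Int) (groups : Int) (separator : String) : String :=
  if group_size ≤ 0 then
    hash_value
  else
    PySem.Str.join separator
      (formatHashLoopA hash_value group_size groups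
        (PySem.List.pyRange 0 (PySem.Str.len hash_value) group_size) [])

-- ===== PORT B =====
-- B's while loop 'while rest and remaining != 0', transliterated with fuel (= one more than the
-- string length; each iteration drops at least one character since group_size ≥ 1, so the fuel
-- is never exhausted — a totality device only, not part of the algorithm).
def formatHashWhileB (gs : Int) : Nat → String → Int → List String → List String
  | 0, _, _, parts => parts
  | fuel + 1, rest, remaining, parts =>
    if rest.toList ≠ [] ∧ remaining ≠ 0 then
      formatHashWhileB gs fuel (PySem.Str.slice rest (some gs) none) (remaining - 1)
        (parts ++ [PySem.Str.slice rest none (some gs)])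
    else parts

def format_hash_alt (hash_value : String) (group_size : Int) (groups : Int) (separator : String) : String :=
  if group_size ≤ 0 then
    hash_value
  else
    PySem.Str.join separator
      (formatHashWhileB group_size (hash_value.toList.length + 1) hash_value
        (if groups > 0 then groups else -1) [])

-- ===== PRECONDITION & SPEC =====
def Spec_format_hash (hash_value : String) (group_size : Int) (groups : Int) (separator : String) (out : String) : Prop := out = format_hash_alt hash_value group_size groups separator
instance (hash_value : String) (group_size : Int) (groups : Int) (separator : String) (out : String) : Decidable (Spec_format_hash hash_value group_size groups separator out) := by unfold Spec_format_hash; infer_instance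

-- ===== CLAIM (what is proved, stated in full; the proofs are below) =====
def Claim_equal_format_hash : Prop := ∀ (hash_value : String) (group_size : Int) (groups : Int) (separator : String), Dom_format_hash hash_value group_size groups separator → Spec_format_hash hash_value group_size groups separator (format_hash hash_value group_size groups separator)

-- ===== LEMMAS AND PROOFS =====

-- When groups ≤ 0 the break never fires: A's loop is a plain map.
lemma loopA_no_break (hv : String) (gs grps : Int) (hg : ¬ grps > 0) :
    ∀ (l : List Int) (parts : List String),
      formatHashLoopA hv gs grps l parts
        = parts ++ l.map (fun i => PySem.Str.slice hv (some i) (some (i + gs))) := by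
  intro l
  induction l with
  | nil => intro parts; simp [formatHashLoopA]
  | cons i rest ih =>
    intro parts
    simp only [formatHashLoopA]
    rw [if_neg (by tauto)]
    rw [ih]
    simp

-- When groups > 0 A's loop produces exactly the first (groups - len parts) chunks.
lemma loopA_break (hv : String) (gs grps : Int) (hg : 0 < grps) :
    ∀ (l : List Int) (parts : List String), (parts.length : Int) < grps →
      formatHashLoopA hv gs grps l parts
        = parts ++ (l.take (grps.toNat - parts.length)).map
            (fun i => PySem.Str.slice hv (some i) (some (i + gs))) := by
  intro l
  induction l with
  | nil => intro parts _; simp [formatHashLoopA]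
  | cons i rest ih =>
    intro parts hlt
    simp only [formatHashLoopA]
    by_cases hstop : (((parts ++ [PySem.Str.slice hv (some i) (some (i + gs))]).length : Int)) ≥ grps
    · rw [if_pos ⟨hg, hstop⟩]
      have h1 : grps.toNat - parts.length = 1 := by
        simp only [List.length_append, List.length_cons, List.length_nil] at hstop
        omega
      rw [h1]
      simp
    · rw [if_neg (by tauto)]
      simp only [List.length_append, List.length_cons, List.length_nil] at hstop
      rw [ih _ (by simp; omega)]
      have h2 : grps.toNat - parts.length = (grps.toNat - (parts.length + 1)) + 1 := by omega
      rw [h2, List.take_succ_cons]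
      simp

-- The list of groups both programs produce, as lists of characters (proof-side reference function).
def chunkFuel (gs : Int) : Nat → List Char → List (List Char)
  | 0, _ => []
  | f + 1, cs => if cs = [] then [] else cs.take gs.toNat :: chunkFuel gs f (cs.drop gs.toNat)

lemma whileB_zero (gs : Int) (f : Nat) (s : String) (parts : List String) :
    formatHashWhileB gs f s 0 parts = parts := by
  cases f <;> simp [formatHashWhileB]

-- With a negative countdown (groups ≤ 0 in B) the loop consumes the whole string.
lemma whileB_neg (gs : Int) (hgs : 0 < gs) :
    ∀ (f : Nat) (s : String) (rem : Int) (parts : List String), rem < 0 →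
      formatHashWhileB gs f s rem parts
        = parts ++ (chunkFuel gs f s.toList).map String.ofList := by
  intro f
  induction f with
  | zero => intro s rem parts _; simp [formatHashWhileB, chunkFuel]
  | succ f ih =>
    intro s rem parts hrem
    simp only [formatHashWhileB, chunkFuel]
    by_cases hs : s.toList = []
    · simp [hs]
    · rw [if_pos ⟨hs, by omega⟩, if_neg hs]
      rw [ih _ _ _ (by omega)]
      rw [PySem.Str.toList_slice]
      simp only [PySem.Chars.slice_eq_listSlice, PySem.List.slice_from _ (le_of_lt hgs)]
      have hTake : PySem.Str.slice s none (some gs)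
          = String.ofList (s.toList.take gs.toNat) := by
        simp [PySem.Str.slice, PySem.Chars.slice_eq_listSlice,
          PySem.List.slice_to _ (le_of_lt hgs)]
      rw [hTake]
      simp

-- With a positive countdown the loop produces the first rem groups.
lemma whileB_pos (gs : Int) (hgs : 0 < gs) :
    ∀ (f : Nat) (s : String) (rem : Int) (parts : List String), 0 < rem →
      formatHashWhileB gs f s rem parts
        = parts ++ ((chunkFuel gs f s.toList).take rem.toNat).map String.ofList := by
  intro f
  induction f with
  | zero => intro s rem parts _; simp [formatHashWhileB, chunkFuel]
  | succ f ih =>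
    intro s rem parts hrem
    simp only [formatHashWhileB, chunkFuel]
    by_cases hs : s.toList = []
    · simp [hs]
    · rw [if_pos ⟨hs, by omega⟩, if_neg hs]
      have hTake : PySem.Str.slice s none (some gs)
          = String.ofList (s.toList.take gs.toNat) := by
        simp [PySem.Str.slice, PySem.Chars.slice_eq_listSlice,
          PySem.List.slice_to _ (le_of_lt hgs)]
      have hDrop : (PySem.Str.slice s (some gs) none).toList = s.toList.drop gs.toNat := by
        rw [PySem.Str.toList_slice]
        simp [PySem.Chars.slice_eq_listSlice, PySem.List.slice_from _ (le_of_lt hgs)]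
      have htn : rem.toNat = (rem.toNat - 1) + 1 := by omega
      by_cases h1 : rem = 1
      · subst h1
        have hz : (1 : Int) - 1 = 0 := by norm_num
        rw [hz, whileB_zero]
        simp [hTake]
      · rw [ih _ _ _ (by omega)]
        rw [hDrop, hTake]
        have h2 : (rem - 1).toNat = rem.toNat - 1 := by omega
        rw [h2, htn, List.take_succ_cons]
        simp

-- ceiling-count step: the number of stride positions for a nonempty string is one more
-- than for the string with its first group removed.
lemma cnt_succ (gs n : Int) (hgs : 0 < gs) (hn : 0 < n) :
    ((n + gs - 1) / gs).toNat
      = (if 0 < n - gs then ((n - gs + gs - 1) / gs).toNat else 0) + 1 := by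
  have key : (n + gs - 1) / gs = (n - 1) / gs + 1 := by
    have h : n + gs - 1 = (n - 1) + 1 * gs := by ring
    rw [h, Int.add_mul_ediv_right _ _ (ne_of_gt hgs)]
  have h0 : 0 ≤ (n - 1) / gs := Int.ediv_nonneg (by omega) (le_of_lt hgs)
  by_cases h : gs < n
  · rw [if_pos (by omega)]
    have h2 : n - gs + gs - 1 = n - 1 := by ring
    rw [h2, key]
    omega
  · rw [if_neg (by omega), key, Int.ediv_eq_zero_of_lt (by omega) (by omega)]
    decide

-- A's stride map over range(0, len, gs) is exactly the peeled group list.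
lemma range_eq_chunk (g : Nat) (hg : 0 < g) :
    ∀ (f : Nat) (cs : List Char), cs.length < f →
      (PySem.List.pyRange 0 (cs.length : Int) (g : Int)).map
          (fun i => PySem.List.slice cs (some i) (some (i + (g : Int))))
        = chunkFuel (g : Int) f cs := by
  intro f
  induction f with
  | zero => intro cs h; omega
  | succ f ih =>
    intro cs hlen
    have hg' : (0 : Int) < (g : Int) := by exact_mod_cast hg
    by_cases hs : cs = []
    · subst hs
      rw [PySem.List.pyRange_of_pos 0 ((([] : List Char).length : Int)) hg']
      simp [chunkFuel]
    · have hn : 0 < cs.length := List.length_pos_of_ne_nil hs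
      rw [PySem.List.pyRange_of_pos 0 (cs.length : Int) hg']
      rw [if_pos (by exact_mod_cast hn)]
      have hcnt := cnt_succ (g : Int) (cs.length : Int) hg' (by exact_mod_cast hn)
      simp only [sub_zero] at hcnt ⊢
      rw [hcnt, List.range_succ_eq_map]
      simp only [List.map_cons, List.map_map, chunkFuel, if_neg hs, Int.toNat_natCast]
      congr 1
      · -- head group
        have e0 : (0 : Int) + (g : Int) * ((0 : Nat) : Int) = ((0 : Nat) : Int) := by
          push_cast; ring
        simp only [Nat.cast_zero, mul_zero, add_zero, zero_add]
        have := PySem.List.slice_natCast_add cs 0 g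
        simp only [Nat.cast_zero, zero_add] at this
        rw [this]
        simp
      · -- tail groups
        have hdl : (cs.drop g).length = cs.length - g := by simp
        have hcnt2 : (if (0 : Int) < (cs.length : Int) - (g : Int) then
              (((cs.length : Int) - (g : Int) + (g : Int) - 1) / (g : Int)).toNat else 0)
            = (if (0 : Int) < ((cs.drop g).length : Int) then
              ((((cs.drop g).length : Int) + (g : Int) - 1) / (g : Int)).toNat else 0) := by
          by_cases h : g < cs.length
          · rw [if_pos (by omega), if_pos (by rw [hdl]; omega)]
            congr 2
            rw [hdl]
            omega
          · rw [if_neg (by omega), if_neg (by rw [hdl]; omega)]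
        rw [← ih (cs.drop g) (by omega)]
        rw [PySem.List.pyRange_of_pos 0 (((cs.drop g).length : Int)) hg']
        simp only [sub_zero, List.map_map]
        rw [← hcnt2]
        apply List.map_congr_left
        intro k hk
        simp only [Function.comp]
        have e1 : (0 : Int) + (g : Int) * ((Nat.succ k : Nat) : Int)
            = ((g * (k + 1) : Nat) : Int) := by push_cast; ring
        have e2 : (0 : Int) + (g : Int) * ((k : Nat) : Int) = ((g * k : Nat) : Int) := by
          push_cast
          ring
        rw [e1, e2]
        have h1 := PySem.List.slice_natCast_add cs (g * (k + 1)) g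
        have h2 := PySem.List.slice_natCast_add (cs.drop g) (g * k) g
        rw [h1, h2, List.drop_drop]
        have h3 : g + g * k = g * (k + 1) := by ring
        rw [h3]

-- ===== VERDICT (by name: the statement is the Claim_ definition above) =====
theorem format_hash_spec : Claim_equal_format_hash := by
  intro hv gs grps sep _
  unfold Spec_format_hash format_hash format_hash_alt
  by_cases hgs : gs ≤ 0
  · simp [hgs]
  · have hgs' : 0 < gs := by omega
    simp only [if_neg hgs]
    congr 1
    have hgsg : gs = (gs.toNat : Int) := (Int.toNat_of_nonneg hgs'.le).symm
    have hchunk := range_eq_chunk gs.toNat (by omega) (hv.toList.length + 1) hv.toList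
      (by omega)
    have hstr : ∀ l : List Int,
        l.map (fun i => PySem.Str.slice hv (some i) (some (i + gs)))
          = (l.map (fun i => PySem.List.slice hv.toList (some i) (some (i + gs)))).map
              String.ofList := by
      intro l
      rw [List.map_map]
      apply List.map_congr_left
      intro i _
      simp [PySem.Str.slice, PySem.Chars.slice_eq_listSlice]
    by_cases hg : grps > 0
    · rw [loopA_break hv gs grps hg _ [] (by simpa using hg)]
      simp only [if_pos hg]
      rw [whileB_pos gs hgs' _ _ _ _ hg]
      rw [hstr]
      simp only [List.length_nil, Nat.sub_zero]
      rw [List.map_take]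
      rw [PySem.Str.len_eq, hgsg]
      rw [hchunk]
    · rw [loopA_no_break hv gs grps hg _ []]
      simp only [if_neg hg]
      rw [whileB_neg gs hgs' _ _ _ _ (by norm_num)]
      rw [hstr]
      rw [PySem.Str.len_eq, hgsg]
      rw [hchunk]
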